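-- pv_equiv track=rewrite | github.com/DPNT-Sourcecode/CHK-qrkc01 | lib/solutions/CHK/checkout_solution.py | checkout_r2
-- ===== SOURCE A (Python) =====
-- def checkout_r2(skus: str):
--     """
--     Calculate the total checkout value of all items in the basket
--     considering any special offers
--
--     Args:
--     - skus (str): String containing the SKUs of all products
--
--     Returns:
--     - int: The total checkout value or -1 for illegal input
--     """
--     prices = {'A': 50, 'B': 30, 'C': 20, 'D': 15, 'E': 40}
--     discount_offers = {
--         'A': [(5, 200), (3, 130)],
--         'B': [(2, 45)],
--     }
--     free_item_offers = {
--         'E': [('B', 2, 1)],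
--     }
--     items = {}
--
--     for sku in skus:
--         if sku not in prices:
--             return -1
--         if sku in items:
--             items[sku] += 1
--         else:
--             items[sku] = 1
--
--     # Apply free item offers
--     for item, offers in free_item_offers.items():
--         for free_item, required_qty, free_qty in offers:
--             if item in items and free_item in items:
--                 num_free_items = (items[item] // required_qty) * free_qty
--                 items[free_item] = max(0, items[free_item] - num_free_items)
--
--     total_price = 0
--     # Apply discount offers and calculate total
--     for item, quantity in items.items():
--         if item in discount_offers:
--             for offer_qty, offer_price in discount_offers[item]:
--                 while quantity >= offer_qty:
--                     total_price += offer_price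
--                     quantity -= offer_qty
--         # Calculate price for remaining items
--         total_price += quantity * prices[item]
--
--     return total_price
-- ===== SOURCE B (Python) =====
-- def checkout_r2(skus: str):
--     """Closed-form re-implementation: count each SKU once, then price by divmod arithmetic."""
--     if any(ch not in 'ABCDE' for ch in skus):
--         return -1
--     a = skus.count('A')
--     b = skus.count('B')
--     c = skus.count('C')
--     d = skus.count('D')
--     e = skus.count('E')
--     b = max(0, b - e // 2)  # every 2 E's give one B free
--     return (200 * (a // 5) + 130 * (a % 5 // 3) + 50 * (a % 5 % 3)
--             + 45 * (b // 2) + 30 * (b % 2)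
--             + 20 * c + 15 * d + 40 * e)
-- ===== Notes on version B (the rewrite author's own statement) =====
-- stated objective: simpler
-- what changed: Replaces the dict-building loop, the generic offer-table iteration and the per-tier while-subtraction loops with five str.count calls and one closed-form divmod price expression per SKU.
import Mathlib
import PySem

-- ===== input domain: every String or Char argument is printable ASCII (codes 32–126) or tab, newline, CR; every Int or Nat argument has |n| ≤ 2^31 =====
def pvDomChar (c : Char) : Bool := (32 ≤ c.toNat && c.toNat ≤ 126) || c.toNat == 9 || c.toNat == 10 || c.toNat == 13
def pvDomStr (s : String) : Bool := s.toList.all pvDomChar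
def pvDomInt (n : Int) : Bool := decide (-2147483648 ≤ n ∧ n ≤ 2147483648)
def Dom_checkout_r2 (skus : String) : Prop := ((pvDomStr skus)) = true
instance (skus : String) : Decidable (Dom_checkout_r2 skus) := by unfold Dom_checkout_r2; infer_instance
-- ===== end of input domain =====

-- B replaces A's dict-building loop, offer-table iteration and per-tier while-subtraction loops by
-- five character counts and one closed-form divmod pricing expression (objective: simpler).

-- ===== PORT A =====
def pvPrices : PySem.Dict Char Int :=
  PySem.Dict.ofList [('A', 50), ('B', 30), ('C', 20), ('D', 15), ('E', 40)]

def pvDiscountOffers : PySem.Dict Char (List (Int × Int)) :=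
  PySem.Dict.ofList [('A', [(5, 200), (3, 130)]), ('B', [(2, 45)])]

def pvFreeItemOffers : PySem.Dict Char (List (Char × Int × Int)) :=
  PySem.Dict.ofList [('E', [('B', 2, 1)])]

-- A's first loop: count SKUs into `items`, `return -1` (here: none) on an unknown SKU
def pvTally : List Char → PySem.Dict Char Int → Option (PySem.Dict Char Int)
  | [], items => some items
  | sku :: rest, items =>
    if pvPrices.contains sku then
      pvTally rest (if items.contains sku then items.insert sku (items.getD sku 0 + 1)
                    else items.insert sku 1)
    else none

-- `while quantity >= offer_qty: total += offer_price; quantity -= offer_qty` on state (total, quantity);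
-- the extra conjunct 0 < offerQty only makes the recursion total (every offer quantity in A is a positive literal)
def pvWhileOffer (offerQty offerPrice : Int) (s : Int × Int) : Int × Int :=
  if h : 0 < offerQty ∧ offerQty ≤ s.2 then
    pvWhileOffer offerQty offerPrice (s.1 + offerPrice, s.2 - offerQty)
  else s
termination_by s.2.toNat
decreasing_by omega

-- A's free-item pass (the dict lookups items[item]/items[free_item] are guarded by `in`, so getD is exact)
def pvApplyFree (items : PySem.Dict Char Int) : PySem.Dict Char Int :=
  pvFreeItemOffers.items.foldl (fun items io =>
    io.2.foldl (fun items off =>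
      if items.contains io.1 && items.contains off.1 then
        items.insert off.1
          (max 0 (items.getD off.1 0 - PySem.Int.floordiv (items.getD io.1 0) off.2.1 * off.2.2))
      else items) items) items

-- A's final pricing loop (prices[item] exists for every tallied key, so getD is exact)
def pvTotal (items : PySem.Dict Char Int) : Int :=
  items.items.foldl (fun total kv =>
    let s :=
      if pvDiscountOffers.contains kv.1 then
        (pvDiscountOffers.getD kv.1 []).foldl (fun s off => pvWhileOffer off.1 off.2 s) (total, kv.2)
      else (total, kv.2)
    s.1 + s.2 * pvPrices.getD kv.1 0) 0

def checkout_r2 (skus : String) : Int :=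
  match pvTally skus.toList PySem.Dict.empty with
  | none => -1
  | some items => pvTotal (pvApplyFree items)

-- ===== PORT B =====
-- (`ch not in 'ABCDE'` on a single character is exactly list membership of that character)
def checkout_r2_alt (skus : String) : Int :=
  if skus.toList.any (fun ch => !("ABCDE".toList.contains ch)) then -1
  else
    let a : Int := (PySem.Str.count skus "A" : Int)
    let b : Int := (PySem.Str.count skus "B" : Int)
    let c : Int := (PySem.Str.count skus "C" : Int)
    let d : Int := (PySem.Str.count skus "D" : Int)
    let e : Int := (PySem.Str.count skus "E" : Int)
    let b2 : Int := max 0 (b - PySem.Int.floordiv e 2)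
    200 * PySem.Int.floordiv a 5 + 130 * PySem.Int.floordiv (PySem.Int.mod a 5) 3
      + 50 * PySem.Int.mod (PySem.Int.mod a 5) 3
      + 45 * PySem.Int.floordiv b2 2 + 30 * PySem.Int.mod b2 2
      + 20 * c + 15 * d + 40 * e

-- ===== PRECONDITION & SPEC =====
def Spec_checkout_r2 (skus : String) (out : Int) : Prop := out = checkout_r2_alt skus
instance (skus : String) (out : Int) : Decidable (Spec_checkout_r2 skus out) := by
  unfold Spec_checkout_r2; infer_instance

-- ===== CLAIM (what is proved, stated in full; the proofs are below) =====
def Claim_equal_checkout_r2 : Prop :=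
  ∀ (skus : String), Dom_checkout_r2 skus → Spec_checkout_r2 skus (checkout_r2 skus)

-- ===== LEMMAS AND PROOFS =====

lemma pvPrices_contains (c : Char) : pvPrices.contains c = ("ABCDE".toList.contains c) := by
  have h : pvPrices.items = [('A', (50:Int)), ('B', 30), ('C', 20), ('D', 15), ('E', 40)] := by decide
  have h2 : "ABCDE".toList = ['A','B','C','D','E'] := by decide
  simp only [PySem.Dict.contains, h, h2, List.any_cons, List.any_nil,
    List.contains_cons, List.contains_nil]
  simp [BEq.comm]

lemma pv_getD_not_contains (d : PySem.Dict Char Int) (c : Char) (h : d.contains c = false) :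
    d.getD c 0 = 0 := by
  simp only [PySem.Dict.getD, PySem.Dict.get?]
  rw [List.find?_eq_none.2]
  · rfl
  · intro p hp
    simp [PySem.Dict.contains] at h
    simpa using h p.1 p.2 hp

lemma pv_step_collapse (d : PySem.Dict Char Int) (c : Char) :
    (if d.contains c then d.insert c (d.getD c 0 + 1) else d.insert c 1)
      = d.insert c (d.getD c 0 + 1) := by
  cases hc : d.contains c with
  | true => simp
  | false => simp [pv_getD_not_contains d c hc]

lemma pvTally_some (l : List Char) (d : PySem.Dict Char Int)
    (h : ∀ c ∈ l, pvPrices.contains c = true) :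
    pvTally l d = some (l.foldl (fun d x => d.insert x (d.getD x 0 + 1)) d) := by
  induction l generalizing d with
  | nil => rfl
  | cons c rest ih =>
    simp only [pvTally, h c (by simp), if_true, List.foldl_cons, pv_step_collapse]
    exact ih _ (fun x hx => h x (by simp [hx]))

lemma pvTally_none (l : List Char) (d : PySem.Dict Char Int)
    (h : ¬ ∀ c ∈ l, pvPrices.contains c = true) :
    pvTally l d = none := by
  induction l generalizing d with
  | nil => simp at h
  | cons c rest ih =>
    by_cases hc : pvPrices.contains c = true
    · simp only [pvTally, hc, if_true]
      exact ih _ (by simpa [hc] using h)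
    · simp only [pvTally, hc]
      simp [hc]

lemma pvWhileOffer_eq (oq op : Int) (s : Int × Int) (hoq : 0 < oq) (hq : 0 ≤ s.2) :
    pvWhileOffer oq op s = (s.1 + op * PySem.Int.floordiv s.2 oq, PySem.Int.mod s.2 oq) := by
  fun_induction pvWhileOffer oq op s with
  | case1 s h ih =>
    rw [ih (by omega)]
    rw [PySem.Int.floordiv_eq_ediv_of_pos hoq, PySem.Int.floordiv_eq_ediv_of_pos hoq,
        PySem.Int.mod_eq_emod_of_pos hoq, PySem.Int.mod_eq_emod_of_pos hoq]
    have h1 : (s.2 - oq) / oq = s.2 / oq - 1 := by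
      rw [show s.2 - oq = s.2 + (-1) * oq by ring, Int.add_mul_ediv_right _ _ (by omega : oq ≠ 0)]
      ring
    have h2 : (s.2 - oq) % oq = s.2 % oq := Int.sub_emod_right s.2 oq
    rw [h1, h2]
    have h3 : s.1 + op + op * (s.2 / oq - 1) = s.1 + op * (s.2 / oq) := by ring
    rw [h3]
  | case2 s h =>
    rw [PySem.Int.floordiv_eq_ediv_of_pos hoq, PySem.Int.mod_eq_emod_of_pos hoq]
    have h2 : s.2 < oq := by omega
    refine Prod.ext ?_ ?_
    · rw [Int.ediv_eq_zero_of_lt hq h2]; ring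
    · rw [Int.emod_eq_of_lt hq h2]

lemma pv_count_go (c : Char) : ∀ (fuel : Nat) (l : List Char) (acc : Nat), l.length ≤ fuel →
    PySem.Chars.count.go [c] fuel l acc = acc + l.count c := by
  intro fuel
  induction fuel with
  | zero => intro l acc h; cases l with
    | nil => simp [PySem.Chars.count.go]
    | cons x t => simp at h
  | succ n ih =>
    intro l acc h
    cases l with
    | nil => simp [PySem.Chars.count.go]
    | cons x t =>
      simp only [PySem.Chars.count.go]
      by_cases hx : c = x
      · subst hx
        simp only [List.isPrefixOf, beq_self_eq_true, Bool.true_and, if_pos]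
        rw [show List.drop [c].length (c :: t) = t from rfl]
        rw [ih t (acc+1) (by rw [List.length_cons] at h; omega)]
        rw [List.count_cons]
        simp
        omega
      · have : ([c].isPrefixOf (x :: t)) = false := by
          simp [List.isPrefixOf, hx]
        rw [this]
        simp only [Bool.false_eq_true, if_false]
        rw [ih t acc (by rw [List.length_cons] at h; omega)]
        rw [List.count_cons]
        simp [hx]
        exact fun h' => hx h'.symm

lemma pv_count_singleton (s : List Char) (c : Char) : PySem.Chars.count s [c] = s.count c := by
  simp only [PySem.Chars.count, List.isEmpty]
  rw [pv_count_go c s.length s 0 le_rfl]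
  simp

-- value held at key k after the free-item pass, expressed on raw counts
def pvAdj (l : List Char) (k : Char) : Int :=
  if k = 'B' ∧ 'B' ∈ l ∧ 'E' ∈ l then
    max 0 ((l.count 'B' : Int) - PySem.Int.floordiv (l.count 'E') 2)
  else (l.count k : Int)

-- per-item contribution of A's pricing loop
def pvContrib (k : Char) (q : Int) : Int :=
  if k = 'A' then
    200 * PySem.Int.floordiv q 5 + 130 * PySem.Int.floordiv (PySem.Int.mod q 5) 3
      + PySem.Int.mod (PySem.Int.mod q 5) 3 * 50
  else if k = 'B' then 45 * PySem.Int.floordiv q 2 + PySem.Int.mod q 2 * 30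
  else if k = 'C' then q * 20
  else if k = 'D' then q * 15
  else if k = 'E' then q * 40
  else 0

lemma pv_insert_items_of_contains (d : PySem.Dict Char Int) (k : Char) (v : Int)
    (h : d.contains k = true) :
    (d.insert k v).items = d.items.map (fun p => if p.1 == k then (k, v) else p) := by
  simp [PySem.Dict.insert, h]

lemma pvApplyFree_counter_items (l : List Char) :
    (pvApplyFree (PySem.Dict.counter l)).items
      = (PySem.Set.ofList l).map (fun k => (k, pvAdj l k)) := by
  have hfo : pvFreeItemOffers.items = [('E', [('B', (2:Int), (1:Int))])] := by decide
  simp only [pvApplyFree, hfo, List.foldl_cons, List.foldl_nil]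
  by_cases hEB : 'E' ∈ l ∧ 'B' ∈ l
  · have hcond : ((PySem.Dict.counter l).contains 'E' && (PySem.Dict.counter l).contains 'B') = true := by
      simp [PySem.Dict.contains_counter, hEB.1, hEB.2]
    rw [if_pos hcond]
    have hcB : (PySem.Dict.counter l).contains 'B' = true := by
      simp [PySem.Dict.contains_counter, hEB.2]
    rw [pv_insert_items_of_contains _ _ _ hcB]
    rw [PySem.Dict.items_counter, List.map_map]
    refine List.map_congr_left ?_
    intro k hk
    simp only [Function.comp]
    by_cases hkB : k = 'B'
    · subst hkB
      simp only [beq_self_eq_true, if_pos]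
      simp [pvAdj, hEB.1, hEB.2, PySem.Dict.getD_counter, mul_one]
    · have : (k == 'B') = false := by simp [hkB]
      rw [this]
      simp only [Bool.false_eq_true, if_false]
      simp [pvAdj, hkB]
  · have hcond : ((PySem.Dict.counter l).contains 'E' && (PySem.Dict.counter l).contains 'B') = false := by
      simp [PySem.Dict.contains_counter]
      intro hE hB
      exact hEB ⟨hE, hB⟩
    rw [if_neg (by simp [hcond])]
    rw [PySem.Dict.items_counter]
    refine List.map_congr_left ?_
    intro k hk
    simp only [pvAdj]
    rw [if_neg (fun h => hEB ⟨h.2.2, h.2.1⟩)]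

lemma pvStep (total q : Int) (k : Char) (hq : 0 ≤ q) :
    (let s :=
      if pvDiscountOffers.contains k then
        (pvDiscountOffers.getD k []).foldl (fun s off => pvWhileOffer off.1 off.2 s) (total, q)
      else (total, q)
     s.1 + s.2 * pvPrices.getD k 0) = total + pvContrib k q := by
  by_cases hA : k = 'A'
  · subst hA
    have hc : pvDiscountOffers.contains 'A' = true := by decide
    have hg : pvDiscountOffers.getD 'A' [] = [((5:Int), (200:Int)), (3, 130)] := by decide
    have hp : pvPrices.getD 'A' 0 = 50 := by decide
    simp only [hc, hg, hp, if_true, List.foldl_cons, List.foldl_nil]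
    rw [pvWhileOffer_eq 5 200 (total, q) (by norm_num) hq]
    rw [pvWhileOffer_eq 3 130 _ (by norm_num) (PySem.Int.mod_nonneg q (by norm_num))]
    simp only [pvContrib]
    norm_num
    ring
  · by_cases hB : k = 'B'
    · subst hB
      have hc : pvDiscountOffers.contains 'B' = true := by decide
      have hg : pvDiscountOffers.getD 'B' [] = [((2:Int), (45:Int))] := by decide
      have hp : pvPrices.getD 'B' 0 = 30 := by decide
      simp only [hc, hg, hp, if_true, List.foldl_cons, List.foldl_nil]
      rw [pvWhileOffer_eq 2 45 (total, q) (by norm_num) hq]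
      simp only [pvContrib]
      have hne : ('B':Char) ≠ 'A' := by decide
      rw [if_neg hne, if_pos trivial]
      ring
    · have hc : pvDiscountOffers.contains k = false := by
        have : pvDiscountOffers.items = [('A', [((5:Int), (200:Int)), (3, 130)]), ('B', [(2, 45)])] := by decide
        simp [PySem.Dict.contains, this, hA, hB]
        constructor
        · exact fun h => hA h.symm
        · exact fun h => hB h.symm
      simp only [hc, Bool.false_eq_true, if_false]
      by_cases hC : k = 'C'
      · subst hC
        have hp : pvPrices.getD 'C' 0 = 20 := by decide
        simp [hp, pvContrib]
      · by_cases hD : k = 'D'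
        · subst hD
          have hp : pvPrices.getD 'D' 0 = 15 := by decide
          simp [hp, pvContrib]
        · by_cases hE : k = 'E'
          · subst hE
            have hp : pvPrices.getD 'E' 0 = 40 := by decide
            simp [hp, pvContrib]
          · have hp : pvPrices.getD k 0 = 0 := by
              apply pv_getD_not_contains
              rw [pvPrices_contains]
              have h2 : "ABCDE".toList = ['A','B','C','D','E'] := by decide
              simp [h2, hA, hB, hC, hD, hE]
            simp [hp, pvContrib, hA, hB, hC, hD, hE]

lemma pvTotal_eq_sum (l : List Char) :
    pvTotal (pvApplyFree (PySem.Dict.counter l))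
      = ((PySem.Set.ofList l).map (fun k => pvContrib k (pvAdj l k))).sum := by
  simp only [pvTotal, pvApplyFree_counter_items, List.foldl_map]
  have hadj : ∀ k, 0 ≤ pvAdj l k := by
    intro k
    simp only [pvAdj]
    split_ifs
    · exact le_max_left _ _
    · exact Int.natCast_nonneg _
  have hstep : ∀ (total : Int), ∀ k ∈ PySem.Set.ofList l,
      (fun total k =>
        (let s :=
          if pvDiscountOffers.contains k then
            (pvDiscountOffers.getD k []).foldl (fun s off => pvWhileOffer off.1 off.2 s)
              (total, pvAdj l k)
          else (total, pvAdj l k)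
         s.1 + s.2 * pvPrices.getD k 0)) total k
      = (fun total k => total + pvContrib k (pvAdj l k)) total k := by
    intro total k _
    exact pvStep total (pvAdj l k) k (hadj k)
  rw [PySem.List.foldl_congr_mem _ _ _ _ hstep]
  rw [PySem.List.foldl_add (PySem.Set.ofList l) (fun k => pvContrib k (pvAdj l k)) 0]
  simp

lemma pv_str_count (skus : String) (c : Char) (s1 : String) (h : s1.toList = [c]) :
    (PySem.Str.count skus s1 : Int) = (skus.toList.count c : Int) := by
  have : PySem.Str.count skus s1 = PySem.Chars.count skus.toList s1.toList := rfl
  rw [this, h, pv_count_singleton]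

lemma pv_main (skus : String) : checkout_r2 skus = checkout_r2_alt skus := by
  by_cases hv : ∀ c ∈ skus.toList, ("ABCDE".toList.contains c) = true
  · have hvP : ∀ c ∈ skus.toList, pvPrices.contains c = true := fun c hc => by
      rw [pvPrices_contains]; exact hv c hc
    have hA : checkout_r2 skus = pvTotal (pvApplyFree (PySem.Dict.counter skus.toList)) := by
      rw [checkout_r2, pvTally_some _ _ hvP, PySem.Dict.foldl_insert_getD_add_one_eq_counter]
    rw [hA, pvTotal_eq_sum]
    have hguard : skus.toList.any (fun ch => !("ABCDE".toList.contains ch)) = false := by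
      simp only [List.any_eq_false]
      intro c hc
      rw [hv c hc]
      simp
    rw [checkout_r2_alt, if_neg (by rw [hguard]; exact Bool.false_ne_true)]
    rw [pv_str_count skus 'A' "A" (by decide), pv_str_count skus 'B' "B" (by decide),
        pv_str_count skus 'C' "C" (by decide), pv_str_count skus 'D' "D" (by decide),
        pv_str_count skus 'E' "E" (by decide)]
    -- sum over the distinct SKUs = sum over all five letters
    have hnd : (PySem.Set.ofList skus.toList).Nodup := PySem.Set.nodup_ofList _
    have habc : "ABCDE".toList = ['A','B','C','D','E'] := by decide
    have hsub : (PySem.Set.ofList skus.toList).toFinset ⊆ (['A','B','C','D','E'] : List Char).toFinset := by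
      intro k hk
      rw [List.mem_toFinset] at *
      have hkl : k ∈ skus.toList := (PySem.Set.mem_ofList _ _).1 hk
      have h2 := hv k hkl
      rw [habc] at h2
      simpa using h2
    have hzero : ∀ k ∈ (['A','B','C','D','E'] : List Char).toFinset,
        k ∉ (PySem.Set.ofList skus.toList).toFinset →
        pvContrib k (pvAdj skus.toList k) = 0 := by
      intro k hk hks
      have hkl : k ∉ skus.toList := fun h =>
        hks (List.mem_toFinset.2 ((PySem.Set.mem_ofList _ _).2 h))
      have hc0 : skus.toList.count k = 0 := List.count_eq_zero.2 hkl
      have hadj : pvAdj skus.toList k = 0 := by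
        simp only [pvAdj]
        split_ifs with h
        · exact absurd (h.1 ▸ h.2.1) hkl
        · simp [hc0]
      rw [hadj]
      fin_cases hk <;> decide
    rw [show ((PySem.Set.ofList skus.toList).map
          (fun k => pvContrib k (pvAdj skus.toList k))).sum
        = ((PySem.Set.ofList skus.toList).toFinset.sum
          (fun k => pvContrib k (pvAdj skus.toList k))) from
      (List.sum_toFinset _ hnd).symm]
    rw [Finset.sum_subset hsub hzero]
    rw [List.sum_toFinset _ (by decide : (['A','B','C','D','E'] : List Char).Nodup)]
    simp only [List.map_cons, List.map_nil, List.sum_cons, List.sum_nil]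
    -- evaluate the five contributions
    have eA : pvAdj skus.toList 'A' = (skus.toList.count 'A' : Int) := by
      simp [pvAdj]
    have eC : pvAdj skus.toList 'C' = (skus.toList.count 'C' : Int) := by
      simp [pvAdj]
    have eD : pvAdj skus.toList 'D' = (skus.toList.count 'D' : Int) := by
      simp [pvAdj]
    have eE : pvAdj skus.toList 'E' = (skus.toList.count 'E' : Int) := by
      simp [pvAdj]
    have eB : pvAdj skus.toList 'B'
        = max 0 ((skus.toList.count 'B' : Int)
            - PySem.Int.floordiv (skus.toList.count 'E' : Int) 2) := by
      simp only [pvAdj]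
      by_cases hBl : 'B' ∈ skus.toList
      · by_cases hEl : 'E' ∈ skus.toList
        · rw [if_pos ⟨trivial, hBl, hEl⟩]
        · rw [if_neg (fun h => hEl h.2.2)]
          have : skus.toList.count 'E' = 0 := List.count_eq_zero.2 hEl
          rw [this]
          have : PySem.Int.floordiv ((0:Nat) : Int) 2 = 0 := by decide
          rw [this, sub_zero, max_eq_right (Int.natCast_nonneg _)]
      · rw [if_neg (fun h => hBl h.2.1)]
        have h0 : skus.toList.count 'B' = 0 := List.count_eq_zero.2 hBl
        rw [h0]
        have hfd : 0 ≤ PySem.Int.floordiv (skus.toList.count 'E' : Int) 2 := by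
          rw [PySem.Int.floordiv_eq_ediv_of_pos (by norm_num)]
          exact Int.ediv_nonneg (Int.natCast_nonneg _) (by norm_num)
        rw [max_eq_left (by push_cast; omega)]
        norm_num
    rw [eA, eB, eC, eD, eE]
    have cA : ∀ q : Int, pvContrib 'A' q
        = 200 * PySem.Int.floordiv q 5 + 130 * PySem.Int.floordiv (PySem.Int.mod q 5) 3
          + PySem.Int.mod (PySem.Int.mod q 5) 3 * 50 := fun q => by simp [pvContrib]
    have cB : ∀ q : Int, pvContrib 'B' q
        = 45 * PySem.Int.floordiv q 2 + PySem.Int.mod q 2 * 30 := fun q => by simp [pvContrib]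
    have cC : ∀ q : Int, pvContrib 'C' q = q * 20 := fun q => by simp [pvContrib]
    have cD : ∀ q : Int, pvContrib 'D' q = q * 15 := fun q => by simp [pvContrib]
    have cE : ∀ q : Int, pvContrib 'E' q = q * 40 := fun q => by simp [pvContrib]
    rw [cA, cB, cC, cD, cE]
    ring
  · have hnone : pvTally skus.toList PySem.Dict.empty = none := by
      apply pvTally_none
      intro hall
      exact hv (fun c hc => by rw [← pvPrices_contains]; exact hall c hc)
    rw [checkout_r2]
    rw [hnone]
    have hguard : skus.toList.any (fun ch => !("ABCDE".toList.contains ch)) = true := by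
      rw [List.any_eq_true]
      push_neg at hv
      obtain ⟨c, hc, hcc⟩ := hv
      exact ⟨c, hc, by simp [Bool.not_eq_true'] at hcc ⊢; exact hcc⟩
    rw [checkout_r2_alt, if_pos hguard]

-- ===== VERDICT (by name: the statement is the Claim_ definition above) =====
theorem checkout_r2_spec : Claim_equal_checkout_r2 := by
  intro skus _
  unfold Spec_checkout_r2
  exact pv_main skus
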